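-- pv_equiv track=rewrite | github.com/gozu/dss-admin-toolkit | admin-toolkit/python-lib/compare_registry.py | classify_issue_notes
-- ===== SOURCE A (Python) =====
-- from typing import Any, Dict, List, Optional, Tuple
--
-- def classify_issue_notes(
--     notes: List[Dict[str, Any]],
--     run1_at: str,
--     run2_at: str,
-- ) -> Tuple[List[Dict[str, Any]], Dict[str, int]]:
--     """Classify issue notes relative to run timestamps."""
--     counts: Dict[str, int] = {
--         'created_between_runs': 0,
--         'visible_at_run1': 0,
--         'visible_at_run2': 0,
--     }
--     classified = []
--
--     for note in notes:
--         created = note.get('created_at', '')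
--         if created <= run2_at:
--             lifecycle = 'visible_at_run2'
--             counts['visible_at_run2'] += 1
--             counts['visible_at_run1'] += 1
--         elif created <= run1_at:
--             lifecycle = 'created_between_runs'
--             counts['created_between_runs'] += 1
--             counts['visible_at_run1'] += 1
--         else:
--             lifecycle = 'after_run1'
--         classified.append({**note, '_lifecycle': lifecycle})
--
--     return classified, counts
-- ===== SOURCE B (Python) =====
-- from typing import Any, Dict, List, Tuple
--
--
-- def classify_issue_notes(
--     notes: List[Dict[str, Any]],
--     run1_at: str,
--     run2_at: str,
-- ) -> Tuple[List[Dict[str, Any]], Dict[str, int]]: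
--     """Classify issue notes relative to run timestamps (two-pass version)."""
--     def label(note: Dict[str, Any]) -> str:
--         created = note.get('created_at', '')
--         if created <= run2_at:
--             return 'visible_at_run2'
--         if created <= run1_at:
--             return 'created_between_runs'
--         return 'after_run1'
--
--     labels = [label(note) for note in notes]
--     classified = [{**note, '_lifecycle': lab} for note, lab in zip(notes, labels)]
--     between = labels.count('created_between_runs')
--     vis2 = labels.count('visible_at_run2')
--     counts = {
--         'created_between_runs': between,
--         'visible_at_run1': between + vis2,
--         'visible_at_run2': vis2,
--     }
--     return classified, counts
-- ===== Notes on version B (the rewrite author's own statement) =====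
-- stated objective: simpler
-- what changed: B separates the interleaved classify-and-count loop into two passes: it first maps each note to its lifecycle label, then derives the counts dict by tallying the label list (visible_at_run1 reconstructed as created_between_runs + visible_at_run2), instead of mutating three counters inside the classification loop.
import Mathlib
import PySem

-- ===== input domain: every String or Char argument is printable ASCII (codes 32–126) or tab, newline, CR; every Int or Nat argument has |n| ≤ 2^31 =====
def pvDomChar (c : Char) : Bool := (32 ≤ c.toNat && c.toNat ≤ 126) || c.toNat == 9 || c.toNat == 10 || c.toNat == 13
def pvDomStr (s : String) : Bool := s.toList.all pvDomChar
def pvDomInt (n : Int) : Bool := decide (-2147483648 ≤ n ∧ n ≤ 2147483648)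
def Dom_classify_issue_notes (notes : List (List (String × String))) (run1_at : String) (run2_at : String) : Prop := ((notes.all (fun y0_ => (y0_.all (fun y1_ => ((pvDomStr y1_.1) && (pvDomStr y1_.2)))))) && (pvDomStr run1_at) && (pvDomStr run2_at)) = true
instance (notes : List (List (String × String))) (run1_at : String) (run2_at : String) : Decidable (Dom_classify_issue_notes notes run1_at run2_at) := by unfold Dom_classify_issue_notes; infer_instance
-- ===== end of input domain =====

-- B replaces A's single interleaved classify-and-count loop by two passes: label each note, then tally the labels (objective: simpler).
-- ===== PORT A =====
def classify_issue_notes (notes : List (List (String × String))) (run1_at : String) (run2_at : String) : (List (List (String × String))) × (List (String × Int)) :=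
  let counts0 : PySem.Dict String Int :=
    PySem.Dict.ofList [("created_between_runs", 0), ("visible_at_run1", 0), ("visible_at_run2", 0)]
  let res := notes.foldl (fun (st : List (List (String × String)) × PySem.Dict String Int) note =>
    let created := (PySem.Dict.mk note).getD "created_at" ""
    if created ≤ run2_at then
      let counts := ((st.2.modify "visible_at_run2" 0 (· + 1)).modify "visible_at_run1" 0 (· + 1))
      (st.1 ++ [((PySem.Dict.mk note).insert "_lifecycle" "visible_at_run2").items], counts)
    else if created ≤ run1_at then
      let counts := ((st.2.modify "created_between_runs" 0 (· + 1)).modify "visible_at_run1" 0 (· + 1))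
      (st.1 ++ [((PySem.Dict.mk note).insert "_lifecycle" "created_between_runs").items], counts)
    else
      (st.1 ++ [((PySem.Dict.mk note).insert "_lifecycle" "after_run1").items], st.2))
    ([], counts0)
  (res.1, res.2.items)


-- ===== PORT B =====
-- helper for B: the lifecycle label of one note
def pvLabel (note : List (String × String)) (run1_at : String) (run2_at : String) : String :=
  let created := (PySem.Dict.mk note).getD "created_at" ""
  if created ≤ run2_at then "visible_at_run2"
  else if created ≤ run1_at then "created_between_runs"
  else "after_run1"

def classify_issue_notes_alt (notes : List (List (String × String))) (run1_at : String) (run2_at : String) : (List (List (String × String))) × (List (String × Int)) :=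
  let labels := notes.map (fun note => pvLabel note run1_at run2_at)
  let classified := (notes.zip labels).map
    (fun p => ((PySem.Dict.mk p.1).insert "_lifecycle" p.2).items)
  let between : Int := labels.count "created_between_runs"
  let vis2 : Int := labels.count "visible_at_run2"
  (classified, [("created_between_runs", between), ("visible_at_run1", between + vis2), ("visible_at_run2", vis2)])


-- ===== PRECONDITION & SPEC =====
def Spec_classify_issue_notes (notes : List (List (String × String))) (run1_at : String) (run2_at : String) (out : (List (List (String × String))) × (List (String × Int))) : Prop := out = classify_issue_notes_alt notes run1_at run2_at
instance (notes : List (List (String × String))) (run1_at : String) (run2_at : String) (out : (List (List (String × String))) × (List (String × Int))) : Decidable (Spec_classify_issue_notes notes run1_at run2_at out) := by unfold Spec_classify_issue_notes; infer_instance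

-- ===== CLAIM (what is proved, stated in full; the proofs are below) =====
def Claim_equal_classify_issue_notes : Prop := ∀ (notes : List (List (String × String))) (run1_at : String) (run2_at : String), Dom_classify_issue_notes notes run1_at run2_at → Spec_classify_issue_notes notes run1_at run2_at (classify_issue_notes notes run1_at run2_at)

-- ===== LEMMAS AND PROOFS =====

-- the shape of A's counts dictionary throughout the loop: the three fixed keys with running values
def pvCDict (a b c : Int) : PySem.Dict String Int :=
  PySem.Dict.mk [("created_between_runs", a), ("visible_at_run1", b), ("visible_at_run2", c)]

theorem pvCDict_mod_v2 (a b c : Int) :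
    (pvCDict a b c).modify "visible_at_run2" 0 (· + 1) = pvCDict a b (c + 1) := rfl

theorem pvCDict_mod_v1 (a b c : Int) :
    (pvCDict a b c).modify "visible_at_run1" 0 (· + 1) = pvCDict a (b + 1) c := rfl

theorem pvCDict_mod_cbr (a b c : Int) :
    (pvCDict a b c).modify "created_between_runs" 0 (· + 1) = pvCDict (a + 1) b c := rfl

-- invariant of A's single loop: it appends B's classified rows and adds B's tallies to the counters
theorem pvLoopA (run1_at run2_at : String) :
    ∀ (notes : List (List (String × String))) (cls : List (List (String × String))) (a b c : Int),
      notes.foldl (fun (st : List (List (String × String)) × PySem.Dict String Int) note =>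
        let created := (PySem.Dict.mk note).getD "created_at" ""
        if created ≤ run2_at then
          let counts := ((st.2.modify "visible_at_run2" 0 (· + 1)).modify "visible_at_run1" 0 (· + 1))
          (st.1 ++ [((PySem.Dict.mk note).insert "_lifecycle" "visible_at_run2").items], counts)
        else if created ≤ run1_at then
          let counts := ((st.2.modify "created_between_runs" 0 (· + 1)).modify "visible_at_run1" 0 (· + 1))
          (st.1 ++ [((PySem.Dict.mk note).insert "_lifecycle" "created_between_runs").items], counts)
        else
          (st.1 ++ [((PySem.Dict.mk note).insert "_lifecycle" "after_run1").items], st.2))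
        (cls, pvCDict a b c) =
      (cls ++ (notes.zip (notes.map (fun note => pvLabel note run1_at run2_at))).map
          (fun p => ((PySem.Dict.mk p.1).insert "_lifecycle" p.2).items),
       pvCDict
        (a + ((notes.map (fun note => pvLabel note run1_at run2_at)).count "created_between_runs" : Int))
        (b + ((notes.map (fun note => pvLabel note run1_at run2_at)).count "created_between_runs" : Int)
           + ((notes.map (fun note => pvLabel note run1_at run2_at)).count "visible_at_run2" : Int))
        (c + ((notes.map (fun note => pvLabel note run1_at run2_at)).count "visible_at_run2" : Int))) := by
  intro notes
  induction notes with
  | nil => intro cls a b c; simp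
  | cons n rest ih =>
    intro cls a b c
    by_cases h2 : (PySem.Dict.mk n).getD "created_at" "" ≤ run2_at
    · have hl : pvLabel n run1_at run2_at = "visible_at_run2" := by simp [pvLabel, h2]
      simp only [List.foldl_cons, List.map_cons, hl, List.zip_cons_cons, List.count_cons, h2,
        if_true, pvCDict_mod_v2, pvCDict_mod_v1, ih]
      simp [pvCDict]
      omega
    · by_cases h1 : (PySem.Dict.mk n).getD "created_at" "" ≤ run1_at
      · have hl : pvLabel n run1_at run2_at = "created_between_runs" := by simp [pvLabel, h2, h1]
        simp only [List.foldl_cons, List.map_cons, hl, List.zip_cons_cons, List.count_cons, h2, h1,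
          if_true, if_false, pvCDict_mod_cbr, pvCDict_mod_v1, ih]
        simp [pvCDict]
        omega
      · have hl : pvLabel n run1_at run2_at = "after_run1" := by simp [pvLabel, h2, h1]
        simp only [List.foldl_cons, List.map_cons, hl, List.zip_cons_cons, List.count_cons, h2, h1,
          if_false, ih]
        simp [pvCDict]

-- ===== VERDICT (by name: the statement is the Claim_ definition above) =====
theorem classify_issue_notes_spec : Claim_equal_classify_issue_notes := by
  intro notes run1_at run2_at _
  show classify_issue_notes notes run1_at run2_at = classify_issue_notes_alt notes run1_at run2_at
  unfold classify_issue_notes classify_issue_notes_alt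
  have h0 : PySem.Dict.ofList [("created_between_runs", (0:Int)), ("visible_at_run1", 0), ("visible_at_run2", 0)] = pvCDict 0 0 0 := rfl
  simp only [h0, pvLoopA run1_at run2_at notes [] 0 0 0]
  simp [pvCDict]
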